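-- pv_equiv track=rewrite | github.com/brandonbondig/streamdeck_hid | app/hid.py | resolve_character
-- ===== SOURCE A (Python) =====
-- MODIFIERS = {
--     "CTRL": 0x01,
--     "CONTROL": 0x01,
--     "SHIFT": 0x02,
--     "ALT": 0x04,
--     "GUI": 0x08,
--     "WIN": 0x08,
--     "CMD": 0x08,
--     "META": 0x08,
--     "RCTRL": 0x10,
--     "RSHIFT": 0x20,
--     "RALT": 0x40,
--     "RGUI": 0x80,
-- }
--
-- SHIFT_CHARACTERS = {
--     "!": "1",
--     "@": "2",
--     "#": "3",
--     "$": "4",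
--     "%": "5",
--     "^": "6",
--     "&": "7",
--     "*": "8",
--     "(": "9",
--     ")": "0",
--     "_": "-",
--     "+": "=",
--     "{": "[",
--     "}": "]",
--     "|": "\\",
--     ":": ";",
--     '"': "'",
--     "~": "`",
--     "<": ",",
--     ">": ".",
--     "?": "/",
-- }
--
-- BASE_CHARACTER_CODES = {
--     "-": 0x2D,
--     "=": 0x2E,
--     "[": 0x2F,
--     "]": 0x30,
--     "\\": 0x31,
--     ";": 0x33,
--     "'": 0x34,
--     "`": 0x35,
--     ",": 0x36,
--     ".": 0x37,
--     "/": 0x38,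
--     " ": 0x2C,
-- }
--
-- class HIDScriptError(RuntimeError):
--     pass
--
-- def resolve_character(character: str) -> tuple[int, int]:
--     if len(character) != 1:
--         raise HIDScriptError(f"Unsupported character token: {character}")
--
--     if "a" <= character <= "z":
--         return 0, 0x04 + (ord(character) - ord("a"))
--
--     if "A" <= character <= "Z":
--         return MODIFIERS["SHIFT"], 0x04 + (ord(character) - ord("A"))
--
--     if "1" <= character <= "9":
--         return 0, 0x1E + (ord(character) - ord("1"))
--
--     if character == "0":
--         return 0, 0x27
--
--     if character in BASE_CHARACTER_CODES:
--         return 0, BASE_CHARACTER_CODES[character]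
--
--     if character in SHIFT_CHARACTERS:
--         _, base_keycode = resolve_character(SHIFT_CHARACTERS[character])
--         return MODIFIERS["SHIFT"], base_keycode
--
--     raise HIDScriptError(f"Unsupported character: {character!r}")
-- ===== SOURCE B (Python) =====
-- SHIFT = 0x02
--
-- BASE_CHARACTER_CODES = {
--     "-": 0x2D, "=": 0x2E, "[": 0x2F, "]": 0x30, "\\": 0x31, ";": 0x33,
--     "'": 0x34, "`": 0x35, ",": 0x36, ".": 0x37, "/": 0x38, " ": 0x2C,
-- }
--
-- SHIFT_CHARACTERS = {
--     "!": "1", "@": "2", "#": "3", "$": "4", "%": "5", "^": "6", "&": "7",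
--     "*": "8", "(": "9", ")": "0", "_": "-", "+": "=", "{": "[", "}": "]",
--     "|": "\\", ":": ";", '"': "'", "~": "`", "<": ",", ">": ".", "?": "/",
-- }
--
-- class HIDScriptError(RuntimeError):
--     pass
--
-- KEYMAP = {}
-- for _i in range(26):
--     KEYMAP[chr(ord("a") + _i)] = (0, 0x04 + _i)
--     KEYMAP[chr(ord("A") + _i)] = (SHIFT, 0x04 + _i)
-- for _i in range(9):
--     KEYMAP[chr(ord("1") + _i)] = (0, 0x1E + _i)
-- KEYMAP["0"] = (0, 0x27)
-- for _ch, _code in BASE_CHARACTER_CODES.items():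
--     KEYMAP[_ch] = (0, _code)
-- for _ch, _base in SHIFT_CHARACTERS.items():
--     KEYMAP[_ch] = (SHIFT, KEYMAP[_base][1])
--
-- def resolve_character(character: str) -> tuple[int, int]:
--     if len(character) != 1:
--         raise HIDScriptError(f"Unsupported character token: {character}")
--     try:
--         return KEYMAP[character]
--     except KeyError:
--         raise HIDScriptError(f"Unsupported character: {character!r}")
-- ===== Notes on version B (the rewrite author's own statement) =====
-- stated objective: simpler
-- what changed: Replaces A's chain of range comparisons, two dict membership tests and a recursive call for shifted characters with a single module-level KEYMAP dict built once, so resolve_character is one lookup.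
import Mathlib
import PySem

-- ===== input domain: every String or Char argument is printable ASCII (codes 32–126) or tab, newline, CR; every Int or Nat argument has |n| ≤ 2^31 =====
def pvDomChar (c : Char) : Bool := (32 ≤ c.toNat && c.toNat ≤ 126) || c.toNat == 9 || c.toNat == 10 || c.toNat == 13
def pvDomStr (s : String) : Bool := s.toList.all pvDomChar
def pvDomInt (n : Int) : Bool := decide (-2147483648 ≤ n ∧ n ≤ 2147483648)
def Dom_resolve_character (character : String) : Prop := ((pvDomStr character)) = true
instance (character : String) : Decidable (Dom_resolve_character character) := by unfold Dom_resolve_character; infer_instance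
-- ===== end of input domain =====

-- B replaces A's cascade of range tests and a recursive shifted-character lookup by one
-- precomputed character→(modifier, keycode) table queried once (objective: simpler lookup structure).


-- ===== PORT A =====
-- single-character dict keys are ported as Char keys; exact for length-1 Python strings
def aBaseCharacterCodes : PySem.Dict Char Int := PySem.Dict.ofList
  [('-', 0x2D), ('=', 0x2E), ('[', 0x2F), (']', 0x30), ('\\', 0x31), (';', 0x33),
   ('\'', 0x34), ('`', 0x35), (',', 0x36), ('.', 0x37), ('/', 0x38), (' ', 0x2C)]

def aShiftCharacters : PySem.Dict Char Char := PySem.Dict.ofList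
  [('!', '1'), ('@', '2'), ('#', '3'), ('$', '4'), ('%', '5'), ('^', '6'), ('&', '7'),
   ('*', '8'), ('(', '9'), (')', '0'), ('_', '-'), ('+', '='), ('{', '['), ('}', ']'),
   ('|', '\\'), (':', ';'), ('"', '\''), ('~', '`'), ('<', ','), ('>', '.'), ('?', '/')]

-- A's recursion, with a fuel guard making the same computation total (depth ≤ 2 in Python);
-- (-1, -1) stands for the raised HIDScriptError (those inputs are outside Pre_).
-- string comparisons "a" <= character (length 1) are exactly comparisons of the single Char.
def aResolve : Nat → List Char → Int × Int
  | 0, _ => (-1, -1)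
  | fuel + 1, cs =>
    match cs with
    | [c] =>
      if 'a' ≤ c ∧ c ≤ 'z' then (0, 0x04 + ((c.toNat : Int) - 97))
      else if 'A' ≤ c ∧ c ≤ 'Z' then (2, 0x04 + ((c.toNat : Int) - 65))
      else if '1' ≤ c ∧ c ≤ '9' then (0, 0x1E + ((c.toNat : Int) - 49))
      else if c = '0' then (0, 0x27)
      else
        match aBaseCharacterCodes.get? c with
        | some code => (0, code)
        | none =>
          match aShiftCharacters.get? c with
          | some b => (2, (aResolve fuel [b]).2)
          | none => (-1, -1)
    | _ => (-1, -1)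

def resolve_character (character : String) : Int × Int := aResolve 2 character.toList

-- ===== PORT B =====
def bBaseCharacterCodes : List (Char × Int) :=
  [('-', 0x2D), ('=', 0x2E), ('[', 0x2F), (']', 0x30), ('\\', 0x31), (';', 0x33),
   ('\'', 0x34), ('`', 0x35), (',', 0x36), ('.', 0x37), ('/', 0x38), (' ', 0x2C)]

def bShiftCharacters : List (Char × Char) :=
  [('!', '1'), ('@', '2'), ('#', '3'), ('$', '4'), ('%', '5'), ('^', '6'), ('&', '7'),
   ('*', '8'), ('(', '9'), (')', '0'), ('_', '-'), ('+', '='), ('{', '['), ('}', ']'),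
   ('|', '\\'), (':', ';'), ('"', '\''), ('~', '`'), ('<', ','), ('>', '.'), ('?', '/')]

-- the module-level KEYMAP built by Source B's four loops, in the same order
def bKeymap : PySem.Dict Char (Int × Int) :=
  let d := (PySem.List.pyRange 0 26 1).foldl
    (fun d i => (d.insert (Char.ofNat (97 + i.toNat)) (0, 0x04 + i)).insert
                  (Char.ofNat (65 + i.toNat)) (2, 0x04 + i)) PySem.Dict.empty
  let d := (PySem.List.pyRange 0 9 1).foldl
    (fun d i => d.insert (Char.ofNat (49 + i.toNat)) (0, 0x1E + i)) d
  let d := d.insert '0' (0, 0x27)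
  let d := bBaseCharacterCodes.foldl (fun d p => d.insert p.1 (0, p.2)) d
  bShiftCharacters.foldl (fun d p => d.insert p.1 (2, (d.getD p.2 (-1, -1)).2)) d

-- (-1, -1) stands for the raised HIDScriptError (outside Pre_)
def resolve_character_alt (character : String) : Int × Int :=
  match character.toList with
  | [c] => (bKeymap.get? c).getD (-1, -1)
  | _ => (-1, -1)

-- ===== PRECONDITION & SPEC =====
-- Pre_ admits exactly the inputs where Python A returns: a single printable-ASCII character
-- (A raises HIDScriptError on any other length and on tab/newline/CR).
def Pre_resolve_character (character : String) : Prop :=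
  character.toList.length = 1 ∧
  character.toList.all (fun c => decide (32 ≤ c.toNat ∧ c.toNat ≤ 126)) = true
instance (character : String) : Decidable (Pre_resolve_character character) := by
  unfold Pre_resolve_character; infer_instance

def pvWitness_resolve_character : String := "a"

def Spec_resolve_character (character : String) (out : Int × Int) : Prop :=
  out = resolve_character_alt character
instance (character : String) (out : Int × Int) : Decidable (Spec_resolve_character character out) := by
  unfold Spec_resolve_character; infer_instance

-- ===== CLAIM =====
def Claim_equal_resolve_character : Prop :=
  ∀ (character : String), Dom_resolve_character character →
    Pre_resolve_character character →
    Spec_resolve_character character (resolve_character character)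

-- ===== LEMMAS AND PROOFS =====
set_option maxRecDepth 10000 in
theorem agree_on_printable :
    ∀ n ∈ List.range 95,
      aResolve 2 [Char.ofNat (32 + n)] =
        (bKeymap.get? (Char.ofNat (32 + n))).getD (-1, -1) := by
  decide

-- ===== VERDICT =====
theorem resolve_character_spec : Claim_equal_resolve_character := by
  intro s _ hpre
  obtain ⟨hlen, hall⟩ := hpre
  match hcs : s.toList with
  | [c] =>
    have hc : 32 ≤ c.toNat ∧ c.toNat ≤ 126 := by
      have := hall; rw [hcs] at this; simpa using this
    unfold Spec_resolve_character resolve_character resolve_character_alt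
    rw [hcs]
    have hofnat : Char.ofNat (32 + (c.toNat - 32)) = c := by
      have : 32 + (c.toNat - 32) = c.toNat := by omega
      rw [this, Char.ofNat_toNat]
    have hmem : c.toNat - 32 ∈ List.range 95 := by
      simp [List.mem_range]; omega
    have := agree_on_printable (c.toNat - 32) hmem
    rwa [hofnat] at this
  | [] => simp [hcs] at hlen
  | _ :: _ :: _ => simp [hcs] at hlen
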